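-- pv_equiv track=rewrite | github.com/hyuntae99/Algorithm | Python3/프로그래머스/2/67257. ［카카오 인턴］ 수식 최대화/［카카오 인턴］ 수식 최대화.py | evaluate
-- ===== SOURCE A (Python) =====
-- def calculate(op, a, b):
--     if op == '+':
--         return a + b
--     elif op == '-':
--         return a - b
--     elif op == '*':
--         return a * b
--
-- def evaluate(expression, operators):
--     # 숫자와 연산자를 분리
--     numbers, ops = [], []
--     num = ''
--     for char in expression:
--         # 숫자일 경우, 추가
--         if char.isdigit():
--             num += char
--         else:
--             # 숫자가 아니면 이전 숫자 추가 + 연산자 추가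
--             numbers.append(int(num))
--             ops.append(char)
--             num = ''
--     numbers.append(int(num)) # 마지막 숫자 처리
--
--     # 각 우선순위에 따라 계산
--     for op in operators:
--         stack_nums, stack_ops = [numbers[0]], []
--         for i in range(len(ops)):
--             stack_ops.append(ops[i])
--             stack_nums.append(numbers[i + 1])
--             # 우선 연산자를 만나면 계산
--             if stack_ops[-1] == op:
--                 b, a = stack_nums.pop(), stack_nums.pop()
--                 stack_nums.append(calculate(op, a, b))
--                 stack_ops.pop()
--
--         numbers, ops = stack_nums, stack_ops
--
--     return abs(numbers[0])
-- ===== SOURCE B (Python) =====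
-- def _apply(op, a, b):
--     return a + b if op == '+' else a - b if op == '-' else a * b
--
--
-- def _eval(order, first, rest):
--     # rest: list of (operator, number) pairs following `first`.
--     # order[-1] is the loosest-binding operator: split on it, recurse on order[:-1].
--     if not order:
--         return first
--     top, sub = order[-1], order[:-1]
--     acc = None
--     segf, segr = first, []
--     for op, v in rest:
--         if op == top:
--             seg = _eval(sub, segf, segr)
--             acc = seg if acc is None else _apply(top, acc, seg)
--             segf, segr = v, []
--         else:
--             segr.append((op, v))
--     seg = _eval(sub, segf, segr)
--     return seg if acc is None else _apply(top, acc, seg)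
--
--
-- def evaluate(expression, operators):
--     nums, ops = [], []
--     num = ''
--     for ch in expression:
--         if ch.isdigit():
--             num += ch
--         else:
--             nums.append(int(num))
--             ops.append(ch)
--             num = ''
--     nums.append(int(num))
--     return abs(_eval(list(operators), nums[0], list(zip(ops, nums[1:]))))
-- ===== Notes on version B (the rewrite author's own statement) =====
-- stated objective: alternative
-- what changed: A repeatedly rewrites the whole token list with one stack-reduction pass per priority level; B evaluates by a single recursion over the priority list, splitting the pair list on the loosest operator and folding the recursively evaluated segments left-to-right.
-- outside the precondition, e.g. on evaluate('1+2*3+4', ['+']): A returns 3, B returns 7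
import Mathlib
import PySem

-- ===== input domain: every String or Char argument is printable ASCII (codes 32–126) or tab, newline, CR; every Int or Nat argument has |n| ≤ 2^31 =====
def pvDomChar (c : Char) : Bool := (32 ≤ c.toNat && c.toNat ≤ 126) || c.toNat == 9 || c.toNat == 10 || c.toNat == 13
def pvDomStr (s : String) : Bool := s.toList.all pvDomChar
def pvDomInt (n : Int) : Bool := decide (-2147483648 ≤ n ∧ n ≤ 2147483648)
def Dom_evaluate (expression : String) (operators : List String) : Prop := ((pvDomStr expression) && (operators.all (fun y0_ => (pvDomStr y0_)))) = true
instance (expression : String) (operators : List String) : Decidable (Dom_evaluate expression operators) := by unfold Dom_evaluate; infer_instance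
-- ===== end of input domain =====

-- B replaces A's per-priority stack-reduction passes over the token list by one recursion over
-- the priority list that splits the pairs on the loosest operator (objective: alternative).

-- ===== PORT A =====
-- both Pythons tokenize with the identical character loop, so the two ports share this helper;
-- int('') raises ValueError in Python — the `.getD 0` default is unreachable under Pre_evaluate
def pyTokenize (expression : String) : List Int × List String :=
  let step := fun (st : List Int × List String × List Char) (c : Char) =>
    if c.isDigit then (st.1, st.2.1, st.2.2 ++ [c])
    else (st.1 ++ [(PySem.Int.ofStr? (String.ofList st.2.2)).getD 0], st.2.1 ++ [String.ofList [c]], ([] : List Char))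
  let r := expression.toList.foldl step ([], [], [])
  (r.1 ++ [(PySem.Int.ofStr? (String.ofList r.2.2)).getD 0], r.2.1)

def calcA (op : String) (a b : Int) : Int :=
  if op = "+" then a + b
  else if op = "-" then a - b
  else if op = "*" then a * b
  else 0  -- Python's calculate returns None here; unreachable under Pre_evaluate

-- one pass of A's inner loop: stack_nums/stack_ops kept as cons-stacks (head = top),
-- reversed back to Python order at the end of the pass
def passA (op : String) (numbers : List Int) (ops : List String) : List Int × List String :=
  let step := fun (st : List Int × List String) (p : String × Int) =>
    let snums := p.2 :: st.1
    let sops := p.1 :: st.2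
    if p.1 = op then
      match snums with
      | b :: a :: rest => (calcA op a b :: rest, sops.tail)
      | _ => (snums, sops)   -- unreachable: the stack holds ≥ 2 numbers here
    else (snums, sops)
  let r := (ops.zip (numbers.drop 1)).foldl step ([numbers.headD 0], [])
  (r.1.reverse, r.2.reverse)

def evaluate (expression : String) (operators : List String) : Int :=
  let t := pyTokenize expression
  let r := operators.foldl (fun st op => passA op st.1 st.2) (t.1, t.2)
  |r.1.headD 0|

-- ===== PORT B =====
def applyB (op : String) (a b : Int) : Int :=
  if op = "+" then a + b else if op = "-" then a - b else a * b

def evalB (order : List String) (first : Int) (rest : List (String × Int)) : Int :=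
  if h : order = [] then first
  else
    let top := order.getLastD ""
    let sub := order.dropLast
    let step := fun (st : Option Int × Int × List (String × Int)) (p : String × Int) =>
      if p.1 = top then
        let seg := evalB sub st.2.1 st.2.2
        (some (match st.1 with | none => seg | some a => applyB top a seg), p.2, ([] : List (String × Int)))
      else (st.1, st.2.1, st.2.2 ++ [p])
    let fin := rest.foldl step (none, first, [])
    let seg := evalB sub fin.2.1 fin.2.2
    match fin.1 with | none => seg | some a => applyB top a seg
termination_by order.length
decreasing_by all_goals (cases order with | nil => exact absurd rfl h | cons a l => simp [List.length_dropLast])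

def evaluate_alt (expression : String) (operators : List String) : Int :=
  let t := pyTokenize expression
  |evalB operators (t.1.headD 0) (t.2.zip (t.1.drop 1))|

-- ===== PRECONDITION & SPEC =====
-- Pre_ covers the task's stated contract plus the trivial mismatch case: the expression
-- alternates numbers with single operator characters, and either every operator character is
-- one of '+','-','*' and occurs in the duplicate-free priority list `operators` (the problem's
-- contract), or no operator character of the expression occurs in `operators` at all (both
-- programs then return the first number).  Excluded while A still returns: inputs breaking the
-- contract halfway — only part of the expression's operators listed, a duplicated priority
-- list, or a matched operator outside '+','-','*' (A's calculate yields None) — where A's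
-- partially-reduced first stack value is accidental.
-- every non-digit character is one of '+','-','*' and occurs (as a 1-char string) in `operators`
def opsOk (operators : List String) : List Char → Bool
  | [] => true
  | c :: cs =>
    (c.isDigit || ((c == '+' || c == '-' || c == '*') && operators.any (fun s => s.toList == [c]))) &&
      opsOk operators cs

-- no two adjacent non-digit characters (Python would hit int('') otherwise)
def noAdjOps : List Char → Bool
  | a :: b :: t => (a.isDigit || b.isDigit) && noAdjOps (b :: t)
  | _ => true

def Pre_evaluate (expression : String) (operators : List String) : Prop :=
  expression.toList ≠ [] ∧
  (expression.toList.head?.getD ' ').isDigit = true ∧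
  (expression.toList.getLast?.getD ' ').isDigit = true ∧
  noAdjOps expression.toList = true ∧
  ((operators.Nodup ∧ opsOk operators expression.toList = true) ∨
    expression.toList.all
      (fun c => c.isDigit || !(operators.any (fun s => s.toList == [c]))) = true)

instance (expression : String) (operators : List String) : Decidable (Pre_evaluate expression operators) := by
  unfold Pre_evaluate; infer_instance

def pvWitness_evaluate : String × List String := ("1+1", ["+"])

def Spec_evaluate (expression : String) (operators : List String) (out : Int) : Prop := out = evaluate_alt expression operators
instance (expression : String) (operators : List String) (out : Int) : Decidable (Spec_evaluate expression operators out) := by unfold Spec_evaluate; infer_instance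

-- ===== CLAIM (what is proved, stated in full; the proofs are below) =====
def Claim_equal_evaluate : Prop := ∀ (expression : String) (operators : List String), Dom_evaluate expression operators → Pre_evaluate expression operators → Spec_evaluate expression operators (evaluate expression operators)

-- ===== LEMMAS AND PROOFS =====

-- pairs-level semantics of A's pass (proof-side only)
def stepP (op : String) (st : Int × List (String × Int)) (p : String × Int) : Int × List (String × Int) :=
  if p.1 = op then
    match st.2 with
    | [] => (calcA op st.1 p.2, [])
    | (o, a) :: t => (st.1, (o, calcA op a p.2) :: t)
  else (st.1, p :: st.2)

def passP (op : String) (st : Int × List (String × Int)) : Int × List (String × Int) :=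
  let r := st.2.foldl (stepP op) (st.1, [])
  (r.1, r.2.reverse)

def foldPass (order : List String) (st : Int × List (String × Int)) : Int × List (String × Int) :=
  order.foldl (fun s op => passP op s) st

-- segments of a pair list, split at the occurrences of `top`
def splitSegs (top : String) : List (String × Int) → List (String × Int) × List (Int × List (String × Int))
  | [] => ([], [])
  | p :: rs =>
    let r := splitSegs top rs
    if p.1 = top then ([], (p.2, r.1) :: r.2) else (p :: r.1, r.2)

def combB (top : String) : Option Int → Int → Int
  | none, x => x
  | some a, x => applyB top a x

def stepB (top : String) (sub : List String) (st : Option Int × Int × List (String × Int)) (p : String × Int) :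
    Option Int × Int × List (String × Int) :=
  if p.1 = top then (some (combB top st.1 (evalB sub st.2.1 st.2.2)), p.2, ([] : List (String × Int)))
  else (st.1, st.2.1, st.2.2 ++ [p])

theorem evalB_nil (first : Int) (rest : List (String × Int)) : evalB [] first rest = first := by
  rw [evalB]; simp

theorem evalB_ne_nil (order : List String) (first : Int) (rest : List (String × Int))
    (h : ¬ order = []) :
    evalB order first rest =
      (let fin := rest.foldl (stepB (order.getLastD "") order.dropLast) (none, first, [])
       combB (order.getLastD "") fin.1 (evalB order.dropLast fin.2.1 fin.2.2)) := by
  rw [evalB, dif_neg h]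
  have hstep : (fun (st : Option Int × Int × List (String × Int)) (p : String × Int) =>
      if p.1 = order.getLastD "" then
        (some (match st.1 with
               | none => evalB order.dropLast st.2.1 st.2.2
               | some a => applyB (order.getLastD "") a (evalB order.dropLast st.2.1 st.2.2)),
         p.2, ([] : List (String × Int)))
      else (st.1, st.2.1, st.2.2 ++ [p])) = stepB (order.getLastD "") order.dropLast := by
    funext st p
    by_cases hp : p.1 = order.getLastD ""
    · cases hacc : st.1 <;> simp only [stepB, if_pos hp, hacc] <;> rfl
    · simp only [stepB, if_neg hp]
  dsimp only
  rw [hstep]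
  cases hfin : (rest.foldl (stepB (order.getLastD "") order.dropLast) (none, first, [])).1 <;>
    rfl

theorem foldB_split (top : String) (sub : List String) :
    ∀ (rest : List (String × Int)) (acc : Option Int) (segf : Int) (segr : List (String × Int)),
      (let fin := rest.foldl (stepB top sub) (acc, segf, segr)
       combB top fin.1 (evalB sub fin.2.1 fin.2.2)) =
      ((splitSegs top rest).2).foldl (fun a s => applyB top a (evalB sub s.1 s.2))
        (combB top acc (evalB sub segf (segr ++ (splitSegs top rest).1))) := by
  intro rest
  induction rest with
  | nil => intro acc segf segr; simp [splitSegs]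
  | cons p rest ih =>
    intro acc segf segr
    by_cases hp : p.1 = top
    · simp only [List.foldl_cons, stepB, if_pos hp, splitSegs]
      rw [ih]
      simp [combB]
    · simp only [List.foldl_cons, stepB, if_neg hp, splitSegs]
      rw [ih]
      simp

theorem evalB_splitSegs (order : List String) (h : ¬ order = []) (first : Int) (rest : List (String × Int)) :
    evalB order first rest =
      ((splitSegs (order.getLastD "") rest).2).foldl
        (fun a s => applyB (order.getLastD "") a (evalB order.dropLast s.1 s.2))
        (evalB order.dropLast first (splitSegs (order.getLastD "") rest).1) := by
  rw [evalB_ne_nil order first rest h, foldB_split]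
  simp [combB]

theorem evalB_empty : ∀ (n : Nat) (order : List String), order.length ≤ n → ∀ (f : Int), evalB order f [] = f := by
  intro n
  induction n with
  | zero =>
    intro order h f
    have : order = [] := by cases order <;> simp_all
    rw [this, evalB_nil]
  | succ n ih =>
    intro order h f
    by_cases ho : order = []
    · rw [ho, evalB_nil]
    · rw [evalB_ne_nil order f [] ho]
      simp only [List.foldl_nil, combB]
      exact ih order.dropLast (by simp [List.length_dropLast]; omega) f

theorem passP_nil (op : String) (f : Int) : passP op (f, []) = (f, []) := rfl

theorem stepP_inv (o top : String) :
    ∀ (R : List (String × Int)) (x : Int) (q : List (String × Int)) (F : Int) (tl : List (String × Int)),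
      R.foldl (stepP o) (F, q ++ (top, x) :: tl) =
        ((F : Int), ((R.foldl (stepP o) (x, q)).2 ++ (top, (R.foldl (stepP o) (x, q)).1) :: tl)) := by
  intro R
  induction R with
  | nil => intro x q F tl; rfl
  | cons p R ih =>
    intro x q F tl
    by_cases hp : p.1 = o
    · cases q with
      | nil =>
        simp only [List.foldl_cons, stepP, if_pos hp, List.nil_append]
        exact ih (calcA o x p.2) [] F tl
      | cons r t =>
        simp only [List.foldl_cons, stepP, if_pos hp, List.cons_append]
        exact ih x ((r.1, calcA o r.2 p.2) :: t) F tl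
    · simp only [List.foldl_cons, stepP, if_neg hp]
      exact ih x (p :: q) F tl

theorem passP_split (o top : String) (hne : ¬ o = top) (F V : Int) (C R : List (String × Int)) :
    passP o (F, C ++ (top, V) :: R) =
      ((passP o (F, C)).1, (passP o (F, C)).2 ++ (top, (passP o (V, R)).1) :: (passP o (V, R)).2) := by
  unfold passP
  simp only [List.foldl_append, List.foldl_cons]
  have h1 : stepP o (C.foldl (stepP o) (F, [])) (top, V) =
      ((C.foldl (stepP o) (F, [])).1, (top, V) :: (C.foldl (stepP o) (F, [])).2) := by
    simp only [stepP]
    rw [if_neg (by simpa using fun hh => hne hh.symm)]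
  rw [h1]
  have h2 := stepP_inv o top R V [] (C.foldl (stepP o) (F, [])).1 (C.foldl (stepP o) (F, [])).2
  simp only [List.nil_append] at h2
  rw [h2]
  simp

theorem foldPass_nilpairs (sub : List String) : ∀ (F : Int), foldPass sub (F, []) = (F, []) := by
  induction sub with
  | nil => intro F; rfl
  | cons o sub ih => intro F; simpa [foldPass, passP_nil] using ih F

theorem foldPass_split (top : String) :
    ∀ (sub : List String), top ∉ sub → ∀ (F V : Int) (C R : List (String × Int)),
      foldPass sub (F, C ++ (top, V) :: R) =
        ((foldPass sub (F, C)).1, (foldPass sub (F, C)).2 ++ (top, (foldPass sub (V, R)).1) :: (foldPass sub (V, R)).2) := by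
  intro sub
  induction sub with
  | nil => intro _ F V C R; rfl
  | cons o sub ih =>
    intro htop F V C R
    have ho : ¬ o = top := fun hh => htop (by simp [hh])
    have htop' : top ∉ sub := fun hh => htop (by simp [hh])
    show foldPass sub (passP o (F, C ++ (top, V) :: R)) = _
    rw [passP_split o top ho F V C R]
    rw [ih htop' (passP o (F, C)).1 (passP o (V, R)).1 (passP o (F, C)).2 (passP o (V, R)).2]
    rfl

theorem passP_allTop (top : String) :
    ∀ (ys : List Int) (x : Int), passP top (x, ys.map (fun y => (top, y))) = (ys.foldl (calcA top) x, []) := by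
  have inner : ∀ (ys : List Int) (x : Int),
      (ys.map (fun y => (top, y))).foldl (stepP top) (x, []) = (ys.foldl (calcA top) x, []) := by
    intro ys
    induction ys with
    | nil => intro x; rfl
    | cons y ys ih =>
      intro x
      simp only [List.map_cons, List.foldl_cons, stepP]
      exact ih (calcA top x y)
  intro ys x
  unfold passP
  rw [inner]
  rfl

theorem splitSegs_nofree (top : String) :
    ∀ (rs : List (String × Int)), (∀ p ∈ rs, ¬ p.1 = top) → splitSegs top rs = (rs, []) := by
  intro rs
  induction rs with
  | nil => intro _; rfl
  | cons p rs ih =>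
    intro h
    simp only [splitSegs, if_neg (h p (by simp))]
    rw [ih (fun q hq => h q (by simp [hq]))]

theorem splitSegs_append (top : String) :
    ∀ (c : List (String × Int)), (∀ p ∈ c, ¬ p.1 = top) → ∀ (v : Int) (rest : List (String × Int)),
      splitSegs top (c ++ (top, v) :: rest) =
        (c, (v, (splitSegs top rest).1) :: (splitSegs top rest).2) := by
  intro c
  induction c with
  | nil => intro _ v rest; simp [splitSegs]
  | cons p c ih =>
    intro h v rest
    simp only [List.cons_append, splitSegs, if_neg (h p (by simp))]
    rw [ih (fun q hq => h q (by simp [hq])) v rest]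

theorem splitSegs_top_mem (top : String) :
    ∀ (rs : List (String × Int)), ¬ (splitSegs top rs).2 = [] → ∃ p ∈ rs, p.1 = top := by
  intro rs
  induction rs with
  | nil => intro h; exact absurd rfl h
  | cons p rs ih =>
    intro h
    by_cases hp : p.1 = top
    · exact ⟨p, by simp, hp⟩
    · simp only [splitSegs, if_neg hp] at h
      rcases ih h with ⟨q, hq, hqt⟩
      exact ⟨q, by simp [hq], hqt⟩

theorem firstTop (top : String) :
    ∀ (rs : List (String × Int)),
      (∀ p ∈ rs, ¬ p.1 = top) ∨
        ∃ c v rest, rs = c ++ (top, v) :: rest ∧ (∀ p ∈ c, ¬ p.1 = top) := by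
  intro rs
  induction rs with
  | nil => exact Or.inl (by simp)
  | cons p rs ih =>
    by_cases hp : p.1 = top
    · refine Or.inr ⟨[], p.2, rs, ?_, by simp⟩
      simp [← hp]
    · rcases ih with h | ⟨c, v, rest, hrs, hc⟩
      · exact Or.inl (by rintro q hq; rcases List.mem_cons.mp hq with rfl | hq; exact hp; exact h q hq)
      · refine Or.inr ⟨p :: c, v, rest, by simp [hrs], ?_⟩
        rintro q hq
        rcases List.mem_cons.mp hq with rfl | hq
        · exact hp
        · exact hc q hq

theorem Dstar (sub : List String) (top : String) (htop : top ∉ sub)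
    (IH : ∀ (f : Int) (rs : List (String × Int)),
        (∀ p ∈ rs, p.1 ∈ sub) → (∀ p ∈ rs, p.1 = "+" ∨ p.1 = "-" ∨ p.1 = "*") →
        foldPass sub (f, rs) = (evalB sub f rs, [])) :
    ∀ (n : Nat) (rs : List (String × Int)), rs.length ≤ n → ∀ (f : Int),
      (∀ p ∈ rs, p.1 ∈ sub ∨ p.1 = top) → (∀ p ∈ rs, p.1 = "+" ∨ p.1 = "-" ∨ p.1 = "*") →
      foldPass sub (f, rs) =
        (evalB sub f (splitSegs top rs).1,
         ((splitSegs top rs).2).map (fun s => (top, evalB sub s.1 s.2))) := by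
  intro n
  induction n with
  | zero =>
    intro rs hlen f _ _
    have hrs : rs = [] := by cases rs <;> simp_all
    subst hrs
    rw [foldPass_nilpairs]
    simp only [splitSegs]
    rw [evalB_empty sub.length sub le_rfl]
    simp
  | succ n ihn =>
    intro rs hlen f hmem hops
    rcases firstTop top rs with hfree | ⟨c, v, rest, hrs, hc⟩
    · rw [splitSegs_nofree top rs hfree]
      rw [IH f rs (fun p hp => (hmem p hp).resolve_right (hfree p hp)) hops]
      rfl
    · subst hrs
      rw [foldPass_split top sub htop f v c rest]
      have hcsub : ∀ p ∈ c, p.1 ∈ sub := by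
        intro p hp
        exact ((hmem p (by simp [hp])).resolve_right (hc p hp))
      rw [IH f c hcsub (fun p hp => hops p (by simp [hp]))]
      have hrestlen : rest.length ≤ n := by
        simp [List.length_append] at hlen
        omega
      rw [ihn rest hrestlen v (fun p hp => hmem p (by simp [hp]))
            (fun p hp => hops p (by simp [hp]))]
      rw [splitSegs_append top c hc v rest]
      simp

theorem applyB_eq_calcA (top : String) (h : top = "+" ∨ top = "-" ∨ top = "*") (a b : Int) :
    applyB top a b = calcA top a b := by
  rcases h with h | h | h <;> subst h <;> simp [applyB, calcA]

theorem main_lemma (order : List String) (f : Int) (rs : List (String × Int))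
    (hnd : order.Nodup)
    (hmem : ∀ p ∈ rs, p.1 ∈ order)
    (hops : ∀ p ∈ rs, p.1 = "+" ∨ p.1 = "-" ∨ p.1 = "*") :
    foldPass order (f, rs) = (evalB order f rs, []) := by
  have main_aux : ∀ (n : Nat) (order : List String), order.length ≤ n →
      ∀ (f : Int) (rs : List (String × Int)), order.Nodup →
        (∀ p ∈ rs, p.1 ∈ order) → (∀ p ∈ rs, p.1 = "+" ∨ p.1 = "-" ∨ p.1 = "*") →
        foldPass order (f, rs) = (evalB order f rs, []) := by
    intro n
    induction n with
    | zero =>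
      intro order hlen f rs _ hmem _
      have ho : order = [] := by cases order <;> simp_all
      subst ho
      have hrs : rs = [] := by
        cases rs with
        | nil => rfl
        | cons p rs => exact absurd (hmem p (by simp)) (by simp)
      subst hrs
      rw [foldPass_nilpairs, evalB_nil]
    | succ n ihn =>
      intro order hlen f rs hnd hmem hops
      rcases List.eq_nil_or_concat order with ho | ⟨sub, top, hdec⟩
      · subst ho
        have hrs : rs = [] := by
          cases rs with
          | nil => rfl
          | cons p rs => exact absurd (hmem p (by simp)) (by simp)
        subst hrs
        rw [foldPass_nilpairs, evalB_nil]
      · rw [List.concat_eq_append] at hdec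
        subst hdec
        have hne : ¬ (sub ++ [top]) = [] := by simp
        have htopd : (sub ++ [top]).getLastD "" = top := by simp
        have hdrop : (sub ++ [top]).dropLast = sub := by simp
        have hsubnd : sub.Nodup := (List.nodup_append.mp hnd).1
        have htopnot : top ∉ sub := by
          have hd := (List.nodup_append.mp hnd).2.2
          intro hmem'
          exact hd top hmem' top (by simp) rfl
        have hsublen : sub.length ≤ n := by simp at hlen; omega
        have IHsub : ∀ (f : Int) (rs : List (String × Int)),
            (∀ p ∈ rs, p.1 ∈ sub) → (∀ p ∈ rs, p.1 = "+" ∨ p.1 = "-" ∨ p.1 = "*") →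
            foldPass sub (f, rs) = (evalB sub f rs, []) := by
          intro f rs h1 h2
          exact ihn sub hsublen f rs hsubnd h1 h2
        have hmem' : ∀ p ∈ rs, p.1 ∈ sub ∨ p.1 = top := by
          intro p hp
          have := hmem p hp
          simpa using this
        have hfold : foldPass (sub ++ [top]) (f, rs) = passP top (foldPass sub (f, rs)) := by
          unfold foldPass
          rw [List.foldl_append]
          rfl
        rw [hfold]
        rw [Dstar sub top htopnot IHsub rs.length rs le_rfl f hmem' hops]
        have hmapmap : ((splitSegs top rs).2).map (fun s => (top, evalB sub s.1 s.2)) =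
            (((splitSegs top rs).2).map (fun s => evalB sub s.1 s.2)).map (fun y => (top, y)) := by
          simp [List.map_map, Function.comp]
        rw [hmapmap, passP_allTop]
        rw [evalB_splitSegs (sub ++ [top]) hne f rs, htopd, hdrop]
        rw [List.foldl_map]
        by_cases hsegs : (splitSegs top rs).2 = []
        · rw [hsegs]
          simp
        · rcases splitSegs_top_mem top rs hsegs with ⟨p, hp, hpt⟩
          have harith : top = "+" ∨ top = "-" ∨ top = "*" := hpt ▸ hops p hp
          have hfl : List.foldl (fun x y => calcA top x (evalB sub y.1 y.2))
                (evalB sub f (splitSegs top rs).1) (splitSegs top rs).2 =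
              List.foldl (fun a s => applyB top a (evalB sub s.1 s.2))
                (evalB sub f (splitSegs top rs).1) (splitSegs top rs).2 := by
            apply List.foldl_ext
            intro a s _
            exact (applyB_eq_calcA top harith a (evalB sub s.1 s.2)).symm
          rw [hfl]
  exact main_aux order.length order le_rfl f rs hnd hmem hops

-- ===== bridge from A's stack port to the pairs-level semantics =====

def stepA (op : String) (st : List Int × List String) (p : String × Int) : List Int × List String :=
  let snums := p.2 :: st.1
  let sops := p.1 :: st.2
  if p.1 = op then
    match snums with
    | b :: a :: rest => (calcA op a b :: rest, sops.tail)
    | _ => (snums, sops)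
  else (snums, sops)

theorem passA_eq (op : String) (numbers : List Int) (ops : List String) :
    passA op numbers ops =
      (((ops.zip (numbers.drop 1)).foldl (stepA op) ([numbers.headD 0], [])).1.reverse,
       ((ops.zip (numbers.drop 1)).foldl (stepA op) ([numbers.headD 0], [])).2.reverse) := rfl

theorem stepA_inv (op : String) :
    ∀ (rs : List (String × Int)) (g : Int) (rev : List (String × Int)),
      rs.foldl (stepA op) (rev.map Prod.snd ++ [g], rev.map Prod.fst) =
        ((rs.foldl (stepP op) (g, rev)).2.map Prod.snd ++ [(rs.foldl (stepP op) (g, rev)).1],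
         (rs.foldl (stepP op) (g, rev)).2.map Prod.fst) := by
  intro rs
  induction rs with
  | nil => intro g rev; rfl
  | cons p rs ih =>
    intro g rev
    by_cases hp : p.1 = op
    · cases rev with
      | nil =>
        simp only [List.foldl_cons, stepA, stepP, if_pos hp, List.map_nil, List.nil_append]
        exact ih (calcA op g p.2) []
      | cons r t =>
        simp only [List.foldl_cons, stepA, stepP, if_pos hp, List.map_cons, List.cons_append]
        exact ih g ((r.1, calcA op r.2 p.2) :: t)
    · simp only [List.foldl_cons, stepA, stepP, if_neg hp]
      exact ih g (p :: rev)

theorem passA_bridge (op : String) (f : Int) (rs : List (String × Int)) :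
    passA op (f :: rs.map Prod.snd) (rs.map Prod.fst) =
      ((passP op (f, rs)).1 :: (passP op (f, rs)).2.map Prod.snd, (passP op (f, rs)).2.map Prod.fst) := by
  rw [passA_eq]
  have hzip : (rs.map Prod.fst).zip ((f :: rs.map Prod.snd).drop 1) = rs := by
    simp [List.zip_map']
  rw [hzip]
  have h0 := stepA_inv op rs f []
  simp only [List.map_nil, List.nil_append] at h0
  show ((rs.foldl (stepA op) ([f], [])).1.reverse, (rs.foldl (stepA op) ([f], [])).2.reverse) = _
  rw [h0]
  unfold passP
  simp [List.map_reverse]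

theorem foldA_bridge :
    ∀ (operators : List String) (f : Int) (rs : List (String × Int)),
      operators.foldl (fun st op => passA op st.1 st.2) (f :: rs.map Prod.snd, rs.map Prod.fst) =
        ((foldPass operators (f, rs)).1 :: (foldPass operators (f, rs)).2.map Prod.snd,
         (foldPass operators (f, rs)).2.map Prod.fst) := by
  intro operators
  induction operators with
  | nil => intro f rs; rfl
  | cons op operators ih =>
    intro f rs
    have h1 : foldPass (op :: operators) (f, rs) = foldPass operators (passP op (f, rs)) := rfl
    simp only [List.foldl_cons, passA_bridge, h1]
    exact ih (passP op (f, rs)).1 (passP op (f, rs)).2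

-- ===== tokenizer facts =====

def stepT (st : List Int × List String × List Char) (c : Char) : List Int × List String × List Char :=
  if c.isDigit then (st.1, st.2.1, st.2.2 ++ [c])
  else (st.1 ++ [(PySem.Int.ofStr? (String.ofList st.2.2)).getD 0], st.2.1 ++ [String.ofList [c]], ([] : List Char))

theorem pyTokenize_eq (e : String) :
    pyTokenize e =
      ((e.toList.foldl stepT ([], [], [])).1 ++
        [(PySem.Int.ofStr? (String.ofList (e.toList.foldl stepT ([], [], [])).2.2)).getD 0],
       (e.toList.foldl stepT ([], [], [])).2.1) := rfl

theorem tok_len (e : String) : (pyTokenize e).1.length = (pyTokenize e).2.length + 1 := by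
  have inv : ∀ (cs : List Char) (st : List Int × List String × List Char),
      st.1.length = st.2.1.length →
      (cs.foldl stepT st).1.length = (cs.foldl stepT st).2.1.length := by
    intro cs
    induction cs with
    | nil => intro st h; exact h
    | cons c cs ih =>
      intro st h
      by_cases hc : c.isDigit
      · simp only [List.foldl_cons, stepT, if_pos hc]
        exact ih _ h
      · simp only [List.foldl_cons, stepT, if_neg hc]
        exact ih _ (by simp [h])
  rw [pyTokenize_eq]
  simp only [List.length_append, List.length_cons, List.length_nil]
  have := inv e.toList ([], [], []) rfl
  omega

theorem tok_ops_mem (e : String) :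
    ∀ s ∈ (pyTokenize e).2, ∃ c ∈ e.toList, c.isDigit = false ∧ s = String.ofList [c] := by
  have inv : ∀ (cs : List Char) (st : List Int × List String × List Char) (s : String),
      s ∈ (cs.foldl stepT st).2.1 →
      s ∈ st.2.1 ∨ ∃ c ∈ cs, c.isDigit = false ∧ s = String.ofList [c] := by
    intro cs
    induction cs with
    | nil => intro st s h; exact Or.inl h
    | cons c cs ih =>
      intro st s h
      by_cases hc : c.isDigit
      · simp only [List.foldl_cons, stepT, if_pos hc] at h
        rcases ih _ s h with h' | ⟨c', hc', hd, hs⟩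
        · exact Or.inl h'
        · exact Or.inr ⟨c', by simp [hc'], hd, hs⟩
      · simp only [List.foldl_cons, stepT, if_neg hc] at h
        rcases ih _ s h with h' | ⟨c', hc', hd, hs⟩
        · rcases List.mem_append.mp h' with h'' | h''
          · exact Or.inl h''
          · refine Or.inr ⟨c, by simp, by simpa using hc, by simpa using h''⟩
        · exact Or.inr ⟨c', by simp [hc'], hd, hs⟩
  intro s hs
  rw [pyTokenize_eq] at hs
  rcases inv e.toList ([], [], []) s hs with h | h
  · simp at h
  · exact h

theorem tok_ne_nil (e : String) : ¬ (pyTokenize e).1 = [] := by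
  unfold pyTokenize
  simp

theorem passP_nomatch (op : String) :
    ∀ (rs : List (String × Int)) (f : Int), (∀ p ∈ rs, ¬ p.1 = op) → passP op (f, rs) = (f, rs) := by
  have inner : ∀ (rs : List (String × Int)) (f : Int) (rev : List (String × Int)),
      (∀ p ∈ rs, ¬ p.1 = op) → rs.foldl (stepP op) (f, rev) = (f, rs.reverse ++ rev) := by
    intro rs
    induction rs with
    | nil => intro f rev _; simp
    | cons p rs ih =>
      intro f rev h
      simp only [List.foldl_cons, stepP, if_neg (h p (by simp))]
      rw [ih f (p :: rev) (fun q hq => h q (by simp [hq]))]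
      simp
  intro rs f h
  unfold passP
  rw [inner rs f [] h]
  simp

theorem foldPass_nomatch :
    ∀ (order : List String) (rs : List (String × Int)) (f : Int),
      (∀ p ∈ rs, ∀ op ∈ order, ¬ p.1 = op) → foldPass order (f, rs) = (f, rs) := by
  intro order
  induction order with
  | nil => intro rs f _; rfl
  | cons op order ih =>
    intro rs f h
    show foldPass order (passP op (f, rs)) = _
    rw [passP_nomatch op rs f (fun p hp => h p hp op (by simp))]
    exact ih rs f (fun p hp o ho => h p hp o (by simp [ho]))

theorem stepB_nomatch (top : String) (sub : List String) :
    ∀ (rs : List (String × Int)) (acc : Option Int) (segf : Int) (segr : List (String × Int)),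
      (∀ p ∈ rs, ¬ p.1 = top) →
      rs.foldl (stepB top sub) (acc, segf, segr) = (acc, segf, segr ++ rs) := by
  intro rs
  induction rs with
  | nil => intro acc segf segr _; simp
  | cons p rs ih =>
    intro acc segf segr h
    simp only [List.foldl_cons, stepB, if_neg (h p (by simp))]
    rw [ih acc segf (segr ++ [p]) (fun q hq => h q (by simp [hq]))]
    simp

theorem evalB_nomatch :
    ∀ (n : Nat) (order : List String), order.length ≤ n → ∀ (f : Int) (rs : List (String × Int)),
      (∀ p ∈ rs, ∀ op ∈ order, ¬ p.1 = op) → evalB order f rs = f := by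
  intro n
  induction n with
  | zero =>
    intro order hlen f rs _
    have : order = [] := by cases order <;> simp_all
    rw [this, evalB_nil]
  | succ n ih =>
    intro order hlen f rs h
    by_cases ho : order = []
    · rw [ho, evalB_nil]
    · rw [evalB_ne_nil order f rs ho]
      have htopmem : order.getLastD "" ∈ order := by
        rcases List.eq_nil_or_concat order with h' | ⟨l, b, h'⟩
        · exact absurd h' ho
        · subst h'; simp
      rw [stepB_nomatch (order.getLastD "") order.dropLast rs none f []
            (fun p hp => h p hp (order.getLastD "") htopmem)]
      simp only [combB, List.nil_append]
      exact ih order.dropLast (by simp [List.length_dropLast]; omega) f rs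
        (fun p hp op hop => h p hp op (List.dropLast_subset _ hop))

theorem opsOk_spec (operators : List String) :
    ∀ (cs : List Char), opsOk operators cs = true →
      ∀ c ∈ cs, c.isDigit = false →
        (c = '+' ∨ c = '-' ∨ c = '*') ∧ ∃ s ∈ operators, s.toList = [c] := by
  intro cs
  induction cs with
  | nil => intro _ c hc; simp at hc
  | cons d cs ih =>
    intro h c hc hcd
    simp only [opsOk, Bool.and_eq_true] at h
    rcases List.mem_cons.mp hc with rfl | hc
    · rcases Bool.or_eq_true_iff.mp h.1 with hdig | hrest
      · rw [hcd] at hdig; simp at hdig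
      · rcases Bool.and_eq_true_iff.mp hrest with ⟨htriple, hany⟩
        constructor
        · rcases Bool.or_eq_true_iff.mp htriple with h' | h'
          · rcases Bool.or_eq_true_iff.mp h' with h'' | h''
            · exact Or.inl (by simpa using h'')
            · exact Or.inr (Or.inl (by simpa using h''))
          · exact Or.inr (Or.inr (by simpa using h'))
        · rcases List.any_eq_true.mp hany with ⟨s, hs, hbeq⟩
          exact ⟨s, hs, by simpa using hbeq⟩
    · exact ih h.2 c hc hcd

-- ===== VERDICT (by name: the statement is the Claim_ definition above) =====
theorem evaluate_spec : Claim_equal_evaluate := by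
  intro expression operators _hdom hpre
  unfold Spec_evaluate
  obtain ⟨_, _, _, _, hbranch⟩ := hpre
  obtain ⟨f0, tl, ht1⟩ : ∃ f0 tl, (pyTokenize expression).1 = f0 :: tl := by
    cases h : (pyTokenize expression).1 with
    | nil => exact absurd h (tok_ne_nil expression)
    | cons a l => exact ⟨a, l, rfl⟩
  have hlen := tok_len expression
  rw [ht1] at hlen
  simp only [List.length_cons] at hlen
  have htl : tl.length = (pyTokenize expression).2.length := by omega
  have hfst : ((pyTokenize expression).2.zip tl).map Prod.fst = (pyTokenize expression).2 :=
    List.map_fst_zip (le_of_eq htl.symm)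
  have hsnd : ((pyTokenize expression).2.zip tl).map Prod.snd = tl :=
    List.map_snd_zip (le_of_eq htl)
  have hb := foldA_bridge operators f0 ((pyTokenize expression).2.zip tl)
  rw [hsnd, hfst] at hb
  unfold evaluate evaluate_alt
  dsimp only
  rw [ht1]
  rcases hbranch with ⟨hnodup, hopsmem⟩ | hnone
  · -- contract branch: every expression operator is an arithmetic symbol listed in operators
    have hmem : ∀ p ∈ (pyTokenize expression).2.zip tl, p.1 ∈ operators := by
      rintro ⟨a, b⟩ hp
      have ha : a ∈ (pyTokenize expression).2 := (List.of_mem_zip hp).1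
      rcases tok_ops_mem expression a ha with ⟨c, hc, hcd, hcs⟩
      rcases opsOk_spec operators expression.toList hopsmem c hc hcd with ⟨_, t, htmem, htll⟩
      rw [hcs, ← htll, String.ofList_toList]
      exact htmem
    have hops : ∀ p ∈ (pyTokenize expression).2.zip tl, p.1 = "+" ∨ p.1 = "-" ∨ p.1 = "*" := by
      rintro ⟨a, b⟩ hp
      have ha : a ∈ (pyTokenize expression).2 := (List.of_mem_zip hp).1
      rcases tok_ops_mem expression a ha with ⟨c, hc, hcd, hcs⟩
      rcases opsOk_spec operators expression.toList hopsmem c hc hcd with ⟨htriple, _⟩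
      rcases htriple with rfl | rfl | rfl
      · left; rw [hcs]
      · right; left; rw [hcs]
      · right; right; rw [hcs]
    have hmain := main_lemma operators f0 ((pyTokenize expression).2.zip tl) hnodup hmem hops
    rw [hb, hmain]
    simp
  · -- disjoint branch: no expression operator occurs in operators; both sides keep f0
    have hno : ∀ p ∈ (pyTokenize expression).2.zip tl, ∀ op ∈ operators, ¬ p.1 = op := by
      rintro ⟨a, b⟩ hp op hop hpeq
      have ha : a ∈ (pyTokenize expression).2 := (List.of_mem_zip hp).1
      rcases tok_ops_mem expression a ha with ⟨c, hc, hcd, hcs⟩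
      have hcall := List.all_eq_true.mp hnone c hc
      rw [hcd] at hcall
      simp only [Bool.false_or, Bool.not_eq_true', List.any_eq_false] at hcall
      have : op.toList = [c] := by
        rw [← hpeq, hcs, String.toList_ofList]
      simpa [this] using hcall op hop
    rw [hb, foldPass_nomatch operators ((pyTokenize expression).2.zip tl) f0 hno]
    simp only [List.headD_cons, List.drop_succ_cons, List.drop_zero]
    rw [evalB_nomatch operators.length operators le_rfl f0 _ hno]
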